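-- pv_equiv track=rewrite | github.com/Aditya-raj22/pipeline | server.py | convert_to_frontend_format
-- ===== SOURCE A (Python) =====
-- def convert_to_frontend_format(assets: list[dict]) -> list[dict]:
--     """Convert internal format to frontend expected format."""
--     # Schema mapper already outputs correct keys, just ensure all fields exist
--     result = []
--     for a in assets:
--         result.append({
--             "Asset Name": a.get("Asset Name", a.get("asset_name", "")),
--             "Phase": a.get("Phase", a.get("phase", "")),
--             "Therapeutic Area": a.get("Therapeutic Area", a.get("therapeutic_area", "")),
--             "Modality": a.get("Modality", a.get("modality", "")),
--             "Indication": a.get("Indication", a.get("indication", "")),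
--             "Therapeutic Target": a.get("Therapeutic Target", a.get("therapeutic_target", "")),
--             "Description": a.get("Description", a.get("description", "")),
--             "Company": a.get("Company", a.get("company", "")),
--             "Latest News": a.get("Latest News", a.get("latest_news", "")),
--             "Sources": a.get("Sources", a.get("sources", "")),
--         })
--     return result
-- ===== SOURCE B (Python) =====
-- FRONT_KEYS = ["Asset Name", "Phase", "Therapeutic Area", "Modality",
--               "Indication", "Therapeutic Target", "Description", "Company",
--               "Latest News", "Sources"]
-- SNAKE_KEYS = ["asset_name", "phase", "therapeutic_area", "modality",
--               "indication", "therapeutic_target", "description", "company",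
--               "latest_news", "sources"]
-- FRONT_SET = set(FRONT_KEYS)
-- SNAKE_SET = set(SNAKE_KEYS)
--
--
-- def convert_to_frontend_format(assets: list[dict]) -> list[dict]:
--     """Convert internal format to frontend expected format.
--
--     Instead of probing the asset twice per output field, scan the asset's
--     items once, routing each relevant entry into one of two side indices
--     (first occurrence wins), then assemble the row from the indices.
--     """
--     result = []
--     for a in assets:
--         front = {}
--         snake = {}
--         for k, v in a.items():
--             if k in FRONT_SET:
--                 front.setdefault(k, v)
--             elif k in SNAKE_SET:
--                 snake.setdefault(k, v)
--         result.append({fk: front.get(fk, snake.get(sk, ""))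
--                        for fk, sk in zip(FRONT_KEYS, SNAKE_KEYS)})
--     return result
-- ===== Notes on version B (the rewrite author's own statement) =====
-- stated objective: alternative
-- what changed: Inverted the traversal: instead of two dict lookups into the asset per output field, B scans each asset's items once, routing relevant entries into two side indices (front/snake, first occurrence wins) and then assembles the output row from those indices.
import Mathlib
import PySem

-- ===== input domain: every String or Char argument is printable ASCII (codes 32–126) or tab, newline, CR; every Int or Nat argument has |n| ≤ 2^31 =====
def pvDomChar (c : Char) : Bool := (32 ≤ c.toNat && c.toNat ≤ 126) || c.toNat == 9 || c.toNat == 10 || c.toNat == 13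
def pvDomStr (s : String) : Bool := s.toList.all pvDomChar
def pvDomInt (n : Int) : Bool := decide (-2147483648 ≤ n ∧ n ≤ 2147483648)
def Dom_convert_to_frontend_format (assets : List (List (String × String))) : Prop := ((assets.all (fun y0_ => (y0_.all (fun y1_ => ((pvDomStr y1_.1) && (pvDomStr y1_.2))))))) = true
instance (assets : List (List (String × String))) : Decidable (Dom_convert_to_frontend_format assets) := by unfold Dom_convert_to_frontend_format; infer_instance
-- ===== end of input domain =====

-- B inverts the traversal: one pass over each asset's items routes entries into two side indices
-- (front/snake, first occurrence wins), then the row is assembled from the indices (objective: alternative).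


-- ===== PORT A =====
-- a.get(k, default) on an association-list dict: first-match lookup via PySem.Dict
def pvGet (a : List (String × String)) (k : String) (d : String) : String :=
  (PySem.Dict.mk a).getD k d

def convert_to_frontend_format (assets : List (List (String × String))) : List (List (String × String)) :=
  assets.foldl (fun result a =>
    result ++ [[
      ("Asset Name", pvGet a "Asset Name" (pvGet a "asset_name" "")),
      ("Phase", pvGet a "Phase" (pvGet a "phase" "")),
      ("Therapeutic Area", pvGet a "Therapeutic Area" (pvGet a "therapeutic_area" "")),
      ("Modality", pvGet a "Modality" (pvGet a "modality" "")),
      ("Indication", pvGet a "Indication" (pvGet a "indication" "")),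
      ("Therapeutic Target", pvGet a "Therapeutic Target" (pvGet a "therapeutic_target" "")),
      ("Description", pvGet a "Description" (pvGet a "description" "")),
      ("Company", pvGet a "Company" (pvGet a "company" "")),
      ("Latest News", pvGet a "Latest News" (pvGet a "latest_news" "")),
      ("Sources", pvGet a "Sources" (pvGet a "sources" ""))]]) []

-- ===== PORT B =====
def FRONT_KEYS : List String :=
  ["Asset Name", "Phase", "Therapeutic Area", "Modality", "Indication",
   "Therapeutic Target", "Description", "Company", "Latest News", "Sources"]

def SNAKE_KEYS : List String :=
  ["asset_name", "phase", "therapeutic_area", "modality", "indication",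
   "therapeutic_target", "description", "company", "latest_news", "sources"]

-- the routing step of B's inner loop over a.items(): first occurrence wins (setdefault)
def pvStep (st : PySem.Dict String String × PySem.Dict String String)
    (kv : String × String) : PySem.Dict String String × PySem.Dict String String :=
  if FRONT_KEYS.contains kv.1 then (st.1.setdefault kv.1 kv.2, st.2)
  else if SNAKE_KEYS.contains kv.1 then (st.1, st.2.setdefault kv.1 kv.2)
  else st

def convert_to_frontend_format_alt (assets : List (List (String × String))) : List (List (String × String)) :=
  assets.map (fun a =>
    let st := a.foldl pvStep (PySem.Dict.empty, PySem.Dict.empty)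
    (FRONT_KEYS.zip SNAKE_KEYS).map (fun p => (p.1, st.1.getD p.1 (st.2.getD p.2 ""))))

-- ===== PRECONDITION & SPEC =====
def Spec_convert_to_frontend_format (assets : List (List (String × String))) (out : List (List (String × String))) : Prop := out = convert_to_frontend_format_alt assets
instance (assets : List (List (String × String))) (out : List (List (String × String))) : Decidable (Spec_convert_to_frontend_format assets out) := by unfold Spec_convert_to_frontend_format; infer_instance

-- ===== CLAIM =====
def Claim_equal_convert_to_frontend_format : Prop := ∀ (assets : List (List (String × String))), Dom_convert_to_frontend_format assets → Spec_convert_to_frontend_format assets (convert_to_frontend_format assets)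

-- ===== LEMMAS AND PROOFS =====

-- get? through setdefault at a different key is unchanged
lemma get?_setdefault_of_ne (d : PySem.Dict String String) (k k' : String) (v : String)
    (h : k' ≠ k) : (d.setdefault k v).get? k' = d.get? k' := by
  by_cases hc : d.contains k = true
  · rw [PySem.Dict.setdefault_of_contains d v hc]
  · rw [Bool.not_eq_true] at hc
    rw [PySem.Dict.setdefault_of_not_contains d v hc]
    exact PySem.Dict.get?_insert_of_ne d v h

-- the scan invariant: after folding pvStep over a, the front index answers for a frontend
-- key fk and the snake index answers for a snake key sk exactly as first-match lookup in a
lemma scan_get (fk sk : String)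
    (hf : fk ∈ FRONT_KEYS)
    (hs : sk ∈ SNAKE_KEYS)
    (hns : sk ∉ FRONT_KEYS) :
    ∀ (a : List (String × String)) (f0 s0 : PySem.Dict String String),
      ((a.foldl pvStep (f0, s0)).1.get? fk = (f0.get? fk).or ((PySem.Dict.mk a).get? fk))
    ∧ ((a.foldl pvStep (f0, s0)).2.get? sk = (s0.get? sk).or ((PySem.Dict.mk a).get? sk)) := by
  intro a
  induction a with
  | nil => intro f0 s0; simp [PySem.Dict.get?]
  | cons kv rest ih =>
    intro f0 s0
    obtain ⟨k, v⟩ := kv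
    have hmk : ∀ q : String, (PySem.Dict.mk ((k, v) :: rest)).get? q
        = if k == q then some v else (PySem.Dict.mk rest).get? q :=
      fun q => PySem.Dict.get?_mk_cons ..
    simp only [List.foldl_cons]
    by_cases hkf : k ∈ FRONT_KEYS
    · have hknsk : k ≠ sk := fun h => hns (h ▸ hkf)
      have step : pvStep (f0, s0) (k, v) = (f0.setdefault k v, s0) := by
        simp [pvStep, hkf]
      rw [step]
      obtain ⟨ih1, ih2⟩ := ih (f0.setdefault k v) s0
      constructor
      · rw [ih1, hmk fk]
        by_cases hk : k = fk
        · subst hk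
          rw [PySem.Dict.get?_setdefault_self]
          simp only [beq_self_eq_true, if_true]
          cases h0 : f0.get? k <;> simp [Option.or]
        · rw [get?_setdefault_of_ne f0 k fk v (Ne.symm hk)]
          have hb : (k == fk) = false := by simpa using hk
          simp [hb]
      · rw [ih2, hmk sk]
        have hb : (k == sk) = false := by simpa using hknsk
        simp [hb]
    · by_cases hks : k ∈ SNAKE_KEYS
      · have hknfk : k ≠ fk := fun h => hkf (h ▸ hf)
        have step : pvStep (f0, s0) (k, v) = (f0, s0.setdefault k v) := by
          simp [pvStep, hkf, hks]
        rw [step]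
        obtain ⟨ih1, ih2⟩ := ih f0 (s0.setdefault k v)
        constructor
        · rw [ih1, hmk fk]
          have hb : (k == fk) = false := by simpa using hknfk
          simp [hb]
        · rw [ih2, hmk sk]
          by_cases hk : k = sk
          · subst hk
            rw [PySem.Dict.get?_setdefault_self]
            simp only [beq_self_eq_true, if_true]
            cases h0 : s0.get? k <;> simp [Option.or]
          · rw [get?_setdefault_of_ne s0 k sk v (Ne.symm hk)]
            have hb : (k == sk) = false := by simpa using hk
            simp [hb]
      · have hknfk : k ≠ fk := fun h => hkf (h ▸ hf)
        have hknsk : k ≠ sk := fun h => hks (h ▸ hs)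
        have step : pvStep (f0, s0) (k, v) = (f0, s0) := by
          simp [pvStep, hkf, hks]
        rw [step]
        obtain ⟨ih1, ih2⟩ := ih f0 s0
        constructor
        · rw [ih1, hmk fk]
          have hb : (k == fk) = false := by simpa using hknfk
          simp [hb]
        · rw [ih2, hmk sk]
          have hb : (k == sk) = false := by simpa using hknsk
          simp [hb]

-- one output field, assembled from the two indices, equals A's double lookup
lemma entry_eq (a : List (String × String)) (fk sk : String)
    (hf : fk ∈ FRONT_KEYS)
    (hs : sk ∈ SNAKE_KEYS)
    (hns : sk ∉ FRONT_KEYS) :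
    ((a.foldl pvStep (PySem.Dict.empty, PySem.Dict.empty)).1.getD fk
      ((a.foldl pvStep (PySem.Dict.empty, PySem.Dict.empty)).2.getD sk ""))
    = pvGet a fk (pvGet a sk "") := by
  obtain ⟨h1, h2⟩ := scan_get fk sk hf hs hns a PySem.Dict.empty PySem.Dict.empty
  rw [PySem.Dict.get?_empty] at h1 h2
  simp only [Option.or] at h1 h2
  rw [PySem.Dict.getD_eq_get?_getD, PySem.Dict.getD_eq_get?_getD, h1, h2,
      pvGet, pvGet, PySem.Dict.getD_eq_get?_getD, PySem.Dict.getD_eq_get?_getD]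

-- ===== VERDICT =====
theorem convert_to_frontend_format_spec : Claim_equal_convert_to_frontend_format := by
  intro assets _
  unfold Spec_convert_to_frontend_format convert_to_frontend_format convert_to_frontend_format_alt
  rw [PySem.List.foldl_append_singleton_eq_map]
  simp only [List.nil_append]
  refine List.map_congr_left (fun a _ => ?_)
  have hz : FRONT_KEYS.zip SNAKE_KEYS =
      [("Asset Name", "asset_name"), ("Phase", "phase"),
       ("Therapeutic Area", "therapeutic_area"), ("Modality", "modality"),
       ("Indication", "indication"), ("Therapeutic Target", "therapeutic_target"),
       ("Description", "description"), ("Company", "company"),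
       ("Latest News", "latest_news"), ("Sources", "sources")] := rfl
  simp only [hz, List.map_cons, List.map_nil]
  rw [entry_eq a "Asset Name" "asset_name" (by decide) (by decide) (by decide),
      entry_eq a "Phase" "phase" (by decide) (by decide) (by decide),
      entry_eq a "Therapeutic Area" "therapeutic_area" (by decide) (by decide) (by decide),
      entry_eq a "Modality" "modality" (by decide) (by decide) (by decide),
      entry_eq a "Indication" "indication" (by decide) (by decide) (by decide),
      entry_eq a "Therapeutic Target" "therapeutic_target" (by decide) (by decide) (by decide),
      entry_eq a "Description" "description" (by decide) (by decide) (by decide),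
      entry_eq a "Company" "company" (by decide) (by decide) (by decide),
      entry_eq a "Latest News" "latest_news" (by decide) (by decide) (by decide),
      entry_eq a "Sources" "sources" (by decide) (by decide) (by decide)]
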